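-- pv_equiv track=rewrite | github.com/CleitonSilvaPaes/geek_university_exercicio | Curso01/Secao13/17.py | montar_matriz_saida
-- ===== SOURCE A (Python) =====
-- def isint(*args):
--     valid = []
--     for i in args:
--         try:
--             i = int(i)
--             valid.append(i)
--         except BaseException:
--             valid.append(None)
--     return valid if None not in valid else []
--
-- def montar_matriz_saida(matriz:list, pos:list):
--     pos = [isint(*i) for i in pos]
--     for i in pos:
--         count = 0
--         for j in range(len(pos)):
--             if i == pos[j]:
--                 count +=1
--             if count > 1:
--                 return []
--     for i in range(len(matriz)):
--         for j in range(len(matriz[i])):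
--             for k in range(len(pos)):
--                 if pos[k] == [i, j]:
--                     matriz[i][j] = 0
--     return matriz
-- ===== SOURCE B (Python) =====
-- def montar_matriz_saida(matriz: list, pos: list):
--     # Duplicate rejection in one pass with a seen-set instead of A's quadratic count loop.
--     seen = set()
--     for p in pos:
--         t = tuple(p)
--         if t in seen:
--             return []
--         seen.add(t)
--     # Position-driven pass: write only the targeted cells instead of scanning every matrix cell.
--     for p in pos:
--         if len(p) == 2 and 0 <= p[0] < len(matriz) and 0 <= p[1] < len(matriz[p[0]]):
--             matriz[p[0]][p[1]] = 0
--     return matriz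
-- ===== Notes on version B (the rewrite author's own statement) =====
-- stated objective: faster
-- what changed: Duplicate rejection becomes one pass with a seen-set instead of the quadratic count loop, and the cell-driven triple loop over the whole matrix is replaced by a position-driven pass that writes only in-bounds length-2 targets directly.
import Mathlib
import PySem

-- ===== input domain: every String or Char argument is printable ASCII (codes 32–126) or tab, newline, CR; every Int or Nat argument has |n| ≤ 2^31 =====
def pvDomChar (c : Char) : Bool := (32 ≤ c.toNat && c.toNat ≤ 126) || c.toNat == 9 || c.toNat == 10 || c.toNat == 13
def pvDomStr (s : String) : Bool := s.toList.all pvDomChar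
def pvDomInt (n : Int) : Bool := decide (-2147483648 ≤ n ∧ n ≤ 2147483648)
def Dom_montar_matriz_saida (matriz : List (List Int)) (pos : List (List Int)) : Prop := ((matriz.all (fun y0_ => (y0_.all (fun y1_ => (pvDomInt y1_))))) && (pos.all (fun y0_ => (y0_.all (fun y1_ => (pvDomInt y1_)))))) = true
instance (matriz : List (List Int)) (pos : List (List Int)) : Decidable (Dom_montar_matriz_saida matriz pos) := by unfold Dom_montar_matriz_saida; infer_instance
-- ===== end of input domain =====

-- B rejects duplicate positions with a single seen-set pass and then writes the targeted
-- in-bounds cells directly, instead of A's quadratic count loop plus a scan of every matrix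
-- cell against every position.  Equivalence is about the RETURN value; the Python A (and B)
-- mutate `matriz` in place.

-- ===== PORT A =====
-- isint(*args): on Int arguments int(i) always succeeds, so the try-branch always appends some i.
def isintA (args : List Int) : List Int :=
  let valid : List (Option Int) := args.map (fun i => some i)
  if valid.contains none then [] else valid.filterMap id

-- the inner `for j in range(len(pos))` count loop; early `return []` fires iff the final count > 1
def countEq (all : List (List Int)) (i : List Int) : Nat :=
  all.foldl (fun c j => if i == j then c + 1 else c) 0

def dupLoopA (all : List (List Int)) : List (List Int) → Bool
  | [] => false
  | i :: rest => if countEq all i > 1 then true else dupLoopA all rest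

-- the triple loop: for each cell (i,j), scan all positions, zero on match
def montar_matriz_saida (matriz : List (List Int)) (pos : List (List Int)) : List (List Int) :=
  let pos' := pos.map (fun i => isintA i)
  if dupLoopA pos' pos' then []
  else
    matriz.mapIdx (fun i row =>
      row.mapIdx (fun j x =>
        pos'.foldl (fun v p => if p == [(i : Int), (j : Int)] then 0 else v) x))

-- ===== PORT B =====
-- seen-set duplicate check (Python set of tuples; tuples of ints ↔ the lists themselves)
def seenDupB (seen : PySem.Set (List Int)) : List (List Int) → Bool
  | [] => false
  | p :: rest => if seen.contains p then true else seenDupB (PySem.Set.add seen p) rest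

-- matriz[p[0]][p[1]] = 0 when p is a length-2 in-bounds position, else no-op
def setZeroB (m : List (List Int)) (p : List Int) : List (List Int) :=
  match p with
  | [a, b] =>
    if h : 0 ≤ a ∧ a < (m.length : Int) then
      let row := m.getD a.toNat []
      if 0 ≤ b ∧ b < (row.length : Int) then m.set a.toNat (row.set b.toNat 0) else m
    else m
  | _ => m

def writeLoopB (m : List (List Int)) : List (List Int) → List (List Int)
  | [] => m
  | p :: rest => writeLoopB (setZeroB m p) rest

def montar_matriz_saida_alt (matriz : List (List Int)) (pos : List (List Int)) : List (List Int) :=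
  if seenDupB (PySem.Set.ofList []) pos then [] else writeLoopB matriz pos

-- ===== PRECONDITION & SPEC =====
def Spec_montar_matriz_saida (matriz : List (List Int)) (pos : List (List Int)) (out : List (List Int)) : Prop := out = montar_matriz_saida_alt matriz pos
instance (matriz : List (List Int)) (pos : List (List Int)) (out : List (List Int)) : Decidable (Spec_montar_matriz_saida matriz pos out) := by unfold Spec_montar_matriz_saida; infer_instance

-- ===== CLAIM (what is proved, stated in full; the proofs are below) =====
def Claim_equal_montar_matriz_saida : Prop := ∀ (matriz : List (List Int)) (pos : List (List Int)), Dom_montar_matriz_saida matriz pos → Spec_montar_matriz_saida matriz pos (montar_matriz_saida matriz pos)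

-- ===== LEMMAS AND PROOFS =====

theorem isintA_id (l : List Int) : isintA l = l := by
  simp [isintA, List.filterMap_map]

theorem countEq_eq_count (all : List (List Int)) (i : List Int) :
    countEq all i = all.count i := by
  unfold countEq
  have h : ∀ (xs : List (List Int)) (c : Nat),
      xs.foldl (fun c j => if i == j then c + 1 else c) c = c + xs.count i := by
    intro xs
    induction xs with
    | nil => simp
    | cons x xs ih =>
      intro c
      rw [List.foldl_cons, ih, List.count_cons]
      by_cases hx : i = x
      · simp only [hx, beq_self_eq_true, if_true]
        omega
      · have hb : (i == x) = false := by simpa using hx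
        have hb' : (x == i) = false := by simpa using (Ne.symm hx)
        simp [hb, hb']
  simpa using h all 0

theorem dupLoopA_any (all : List (List Int)) (xs : List (List Int)) :
    dupLoopA all xs = xs.any (fun i => decide (all.count i > 1)) := by
  induction xs with
  | nil => simp [dupLoopA]
  | cons x rest ih =>
    simp only [dupLoopA, countEq_eq_count, List.any_cons, ih]
    by_cases h : all.count x > 1 <;> simp [h]

theorem dupLoopA_iff (pos : List (List Int)) :
    dupLoopA pos pos = true ↔ ¬ pos.Nodup := by
  rw [dupLoopA_any]
  simp only [List.any_eq_true, decide_eq_true_eq]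
  constructor
  · rintro ⟨a, ha, hc⟩ hnd
    rw [List.nodup_iff_count_le_one] at hnd
    have := hnd a
    omega
  · intro hnd
    rw [List.nodup_iff_count_le_one] at hnd
    push_neg at hnd
    obtain ⟨a, ha⟩ := hnd
    refine ⟨a, ?_, ha⟩
    exact List.count_pos_iff.mp (by omega)

theorem seenDupB_iff (seen : PySem.Set (List Int)) (xs : List (List Int)) :
    seenDupB seen xs = true ↔ (∃ p ∈ xs, p ∈ seen) ∨ ¬ xs.Nodup := by
  induction xs generalizing seen with
  | nil => simp [seenDupB]
  | cons x rest ih =>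
    simp only [seenDupB]
    by_cases hx : x ∈ seen
    · have hc : seen.contains x = true := by simpa using hx
      rw [hc]
      simp only [if_true]
      constructor
      · intro _
        exact Or.inl ⟨x, List.mem_cons_self, hx⟩
      · intro _
        trivial
    · have hc : seen.contains x = false := by simpa using hx
      rw [hc]
      simp only [Bool.false_eq_true, if_false, ih]
      constructor
      · rintro (⟨p, hp, hps⟩ | hnd)
        · rcases (PySem.Set.mem_add _ _ _).mp hps with h | h
          · exact Or.inl ⟨p, List.mem_cons_of_mem _ hp, h⟩
          · subst h
            right
            rw [List.nodup_cons]
            rintro ⟨h1, _⟩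
            exact h1 hp
        · right
          rw [List.nodup_cons]
          rintro ⟨_, h2⟩
          exact hnd h2
      · rintro (⟨p, hp, hps⟩ | hnd)
        · rcases List.mem_cons.mp hp with h | h
          · subst h
            exact absurd hps hx
          · exact Or.inl ⟨p, h, (PySem.Set.mem_add _ _ _).mpr (Or.inl hps)⟩
        · rw [List.nodup_cons] at hnd
          push_neg at hnd
          by_cases hmem : x ∈ rest
          · exact Or.inl ⟨x, hmem, (PySem.Set.mem_add _ _ _).mpr (Or.inr rfl)⟩
          · exact Or.inr (hnd hmem)

theorem dup_eq (pos : List (List Int)) :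
    dupLoopA pos pos = seenDupB (PySem.Set.ofList []) pos := by
  have h1 := dupLoopA_iff pos
  have h2 := seenDupB_iff (PySem.Set.ofList []) pos
  have : seenDupB (PySem.Set.ofList []) pos = true ↔ ¬ pos.Nodup := by
    rw [h2]; simp [PySem.Set.ofList]
  rw [Bool.eq_iff_iff, h1, this]

-- the inner position scan of A computes "0 if the cell is targeted, else the old value"
theorem foldl_zero (ps : List (List Int)) (c : List Int) (x : Int) :
    ps.foldl (fun v p => if p == c then 0 else v) x
      = if c ∈ ps then 0 else x := by
  induction ps generalizing x with
  | nil => simp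
  | cons q rest ih =>
    rw [List.foldl_cons, ih]
    by_cases hq : q = c
    · subst hq
      simp
    · have hb : (q == c) = false := by simpa using hq
      simp [hb, Ne.symm hq]

theorem setZeroB_length (m : List (List Int)) (p : List Int) :
    (setZeroB m p).length = m.length := by
  unfold setZeroB
  match p with
  | [] => rfl
  | [a] => rfl
  | [a, b] => dsimp only; split_ifs <;> simp
  | a :: b :: c :: t => rfl

theorem setZeroB_rowD (m : List (List Int)) (p : List Int) (i : Nat) :
    ((setZeroB m p).getD i []).length = (m.getD i []).length := by
  unfold setZeroB
  match p with
  | [] => rfl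
  | [a] => rfl
  | a :: b :: c :: t => rfl
  | [a, b] =>
    dsimp only
    split_ifs with h1 h2
    · by_cases hia : i = a.toNat
      · rw [hia]
        have hi : a.toNat < m.length := by omega
        rw [List.getD_eq_getElem _ _ (show a.toNat < (m.set a.toNat ((m.getD a.toNat []).set b.toNat 0)).length by simpa using hi)]
        rw [List.getElem_set_self (by simpa using hi)]
        rw [List.getD_eq_getElem _ _ hi]
        simp
      · have heq : (m.set a.toNat ((m.getD a.toNat []).set b.toNat 0)).getD i [] = m.getD i [] := by
          by_cases hi : i < m.length
          · rw [List.getD_eq_getElem _ _ hi,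
              List.getD_eq_getElem _ _ (show i < (m.set a.toNat ((m.getD a.toNat []).set b.toNat 0)).length by simpa using hi)]
            exact List.getElem_set_ne (fun h => hia h.symm) _
          · rw [List.getD_eq_default _ _ (by simpa using (show m.length ≤ i by omega)),
              List.getD_eq_default _ _ (by omega)]
        rw [heq]
    · rfl
    · rfl

theorem setZeroB_cellD (m : List (List Int)) (p : List Int) (i j : Nat) :
    ((setZeroB m p).getD i []).getD j 0
      = if p = [(i : Int), (j : Int)] ∧ i < m.length ∧ j < (m.getD i []).length
        then 0 else (m.getD i []).getD j 0 := by
  unfold setZeroB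
  match p with
  | [] => simp
  | [a] => simp
  | a :: b :: c :: t => simp
  | [a, b] =>
    dsimp only
    by_cases hp : ([a, b] : List Int) = [(i : Int), (j : Int)]
    · have ha : a = (i : Int) := by injection hp
      have hb : b = (j : Int) := by
        have h2 := hp; injection h2 with _ h3; injection h3
      subst ha; subst hb
      simp only [Int.toNat_natCast]
      by_cases hi : i < m.length
      · have h1 : 0 ≤ (i : Int) ∧ (i : Int) < (m.length : Int) := by
          refine ⟨Int.natCast_nonneg i, by exact_mod_cast hi⟩
        rw [dif_pos h1]
        by_cases hj : j < (m.getD i []).length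
        · have h2 : 0 ≤ (j : Int) ∧ (j : Int) < ((m.getD i []).length : Int) := by
            refine ⟨Int.natCast_nonneg j, by exact_mod_cast hj⟩
          rw [if_pos h2, if_pos (show True ∧ i < m.length ∧ j < (m.getD i []).length from ⟨trivial, hi, hj⟩)]
          rw [List.getD_eq_getElem _ _ (show i < (m.set i ((m.getD i []).set j 0)).length by simpa using hi)]
          rw [List.getElem_set_self (by simpa using hi)]
          rw [List.getD_eq_getElem _ _ (by simpa using hj)]
          exact List.getElem_set_self (h := by simpa using hj)
        · have h2 : ¬ (0 ≤ (j : Int) ∧ (j : Int) < ((m.getD i []).length : Int)) := by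
            rintro ⟨_, hlt⟩
            exact hj (by exact_mod_cast hlt)
          rw [if_neg h2, if_neg (show ¬ (True ∧ i < m.length ∧ j < (m.getD i []).length) from fun h => hj h.2.2)]
      · have h1 : ¬ (0 ≤ (i : Int) ∧ (i : Int) < (m.length : Int)) := by
          rintro ⟨_, hlt⟩
          exact hi (by exact_mod_cast hlt)
        rw [dif_neg h1, if_neg (show ¬ (True ∧ i < m.length ∧ j < (m.getD i []).length) from fun h => hi h.2.1)]
    · rw [if_neg (show ¬ (([a, b] : List Int) = [(i:Int),(j:Int)] ∧ i < m.length ∧ j < (m.getD i []).length) from fun h => hp h.1)]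
      split_ifs with h1 h2
      · -- an in-bounds write to a different cell leaves (i, j) unchanged
        rcases h1 with ⟨ha0, halt⟩
        by_cases hia : a.toNat = i
        · have hbj : b ≠ (j : Int) := by
            intro hbj
            apply hp
            have ha' : a = (i : Int) := by omega
            rw [ha', hbj]
          have hi' : a.toNat < m.length := by omega
          rw [← hia]
          rw [List.getD_eq_getElem _ _ (show a.toNat < (m.set a.toNat ((m.getD a.toNat []).set b.toNat 0)).length by simpa using hi')]
          rw [List.getElem_set_self (by simpa using hi')]
          rw [List.getD_eq_getElem _ _ hi']
          by_cases hjb : j < (m[a.toNat]'hi').length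
          · have hbj' : b.toNat ≠ j := by
              rcases h2 with ⟨hb0, _⟩
              intro e
              apply hbj
              omega
            rw [List.getD_eq_getElem _ _ (by simpa using hjb)]
            rw [List.getD_eq_getElem _ _ hjb]
            exact List.getElem_set_ne hbj' _
          · rw [List.getD_eq_default _ _ (by simpa using (show (m[a.toNat]'hi').length ≤ j by omega)),
              List.getD_eq_default _ _ (by omega)]
        · have heq : (m.set a.toNat ((m.getD a.toNat []).set b.toNat 0)).getD i [] = m.getD i [] := by
            by_cases hi : i < m.length
            · rw [List.getD_eq_getElem _ _ hi,
                List.getD_eq_getElem _ _ (show i < (m.set a.toNat ((m.getD a.toNat []).set b.toNat 0)).length by simpa using hi)]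
              exact List.getElem_set_ne hia _
            · rw [List.getD_eq_default _ _ (by simpa using (show m.length ≤ i by omega)),
                List.getD_eq_default _ _ (by omega)]
          rw [heq]
      · rfl
      · rfl

theorem writeLoopB_length (m : List (List Int)) (ps : List (List Int)) :
    (writeLoopB m ps).length = m.length := by
  induction ps generalizing m with
  | nil => rfl
  | cons p rest ih => rw [writeLoopB, ih, setZeroB_length]

theorem writeLoopB_rowD (m : List (List Int)) (ps : List (List Int)) (i : Nat) :
    ((writeLoopB m ps).getD i []).length = (m.getD i []).length := by
  induction ps generalizing m with
  | nil => rfl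
  | cons p rest ih => rw [writeLoopB, ih, setZeroB_rowD]

theorem writeLoopB_cellD (m : List (List Int)) (ps : List (List Int)) (i j : Nat)
    (hi : i < m.length) (hj : j < (m.getD i []).length) :
    ((writeLoopB m ps).getD i []).getD j 0
      = if [(i : Int), (j : Int)] ∈ ps then 0 else (m.getD i []).getD j 0 := by
  induction ps generalizing m with
  | nil => simp [writeLoopB]
  | cons p rest ih =>
    rw [writeLoopB]
    rw [ih (setZeroB m p) (by rw [setZeroB_length]; exact hi) (by rw [setZeroB_rowD]; exact hj)]
    rw [setZeroB_cellD m p i j]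
    by_cases hr : [(i : Int), (j : Int)] ∈ rest
    · simp [hr]
    · by_cases hp : p = [(i : Int), (j : Int)]
      · rw [if_neg hr]
        rw [if_pos (show p = [(i : Int), (j : Int)] ∧ i < m.length ∧ j < (m.getD i []).length from ⟨hp, hi, hj⟩)]
        rw [if_pos (show [(i : Int), (j : Int)] ∈ p :: rest from List.mem_cons.mpr (Or.inl hp.symm))]
      · simp [hr, hp, Ne.symm hp]

-- ===== VERDICT (by name: the statement is the Claim_ definition above) =====
theorem montar_matriz_saida_spec : Claim_equal_montar_matriz_saida := by
  unfold Claim_equal_montar_matriz_saida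
  intro matriz pos _
  unfold Spec_montar_matriz_saida
  unfold montar_matriz_saida montar_matriz_saida_alt
  simp only [isintA_id, List.map_id']
  rw [dup_eq]
  by_cases hd : seenDupB (PySem.Set.ofList []) pos = true
  · have hd' : seenDupB [] pos = true := hd
    simp [hd']
  · rw [Bool.not_eq_true] at hd
    simp only [hd, Bool.false_eq_true, if_false]
    apply List.ext_getElem
    · simp [writeLoopB_length]
    · intro i hi1 hi2
      have hiM : i < matriz.length := by simpa using hi1
      have hrowD : matriz.getD i [] = matriz[i] := List.getD_eq_getElem _ _ hiM
      apply List.ext_getElem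
      · simp only [List.getElem_mapIdx]
        rw [← List.getD_eq_getElem _ [] hi2, writeLoopB_rowD, hrowD]
        simp
      · intro j hj1 hj2
        have hjM : j < matriz[i].length := by simpa using hj1
        simp only [List.getElem_mapIdx]
        rw [foldl_zero]
        have h1 : ((writeLoopB matriz pos).getD i []).getD j 0
            = ((writeLoopB matriz pos)[i]'hi2)[j]'hj2 := by
          rw [List.getD_eq_getElem _ _ hi2]
          rw [List.getD_eq_getElem _ _ hj2]
        rw [← h1]
        rw [writeLoopB_cellD matriz pos i j hiM (by rw [hrowD]; exact hjM)]
        rw [hrowD, List.getD_eq_getElem _ _ hjM]
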